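-- pv_equiv track=rewrite | github.com/august-hw2/24_Programmers_Python | 프로그래머스/2/87390. n＾2 배열 자르기/n＾2 배열 자르기.py | solution
-- ===== SOURCE A (Python) =====
-- def solution(n, left, right):
--
--     ans = []
--     for i in range(left, right + 1):
--
--         a = i // n  # 몫
--         b = i % n  # 나머지
--
--         if a < b: a, b = b, a
--         ans.append(a + 1)
--
--     return ans
-- ===== SOURCE B (Python) =====
-- def solution(n, left, right):
--     if left > right:
--         return []
--     r0, c0 = divmod(left, n)
--     r1, c1 = divmod(right, n)
--     ans = []
--     for r in range(r0, r1 + 1):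
--         lo = c0 if r == r0 else 0
--         hi = c1 if r == r1 else n - 1
--         for c in range(lo, hi + 1):
--             ans.append(r + 1 if c <= r else c + 1)
--     return ans
-- ===== Notes on version B (the rewrite author's own statement) =====
-- stated objective: alternative
-- what changed: B replaces A's per-element divmod over the flat index range with one divmod at each end and a nested row/column loop that emits each row's span directly (the first/last rows partial), so divmod vanishes from the inner loop.
-- outside the precondition, e.g. on solution(-2, 0, 3): A returns [1, 0, 1, 0], B returns []
import Mathlib
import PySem

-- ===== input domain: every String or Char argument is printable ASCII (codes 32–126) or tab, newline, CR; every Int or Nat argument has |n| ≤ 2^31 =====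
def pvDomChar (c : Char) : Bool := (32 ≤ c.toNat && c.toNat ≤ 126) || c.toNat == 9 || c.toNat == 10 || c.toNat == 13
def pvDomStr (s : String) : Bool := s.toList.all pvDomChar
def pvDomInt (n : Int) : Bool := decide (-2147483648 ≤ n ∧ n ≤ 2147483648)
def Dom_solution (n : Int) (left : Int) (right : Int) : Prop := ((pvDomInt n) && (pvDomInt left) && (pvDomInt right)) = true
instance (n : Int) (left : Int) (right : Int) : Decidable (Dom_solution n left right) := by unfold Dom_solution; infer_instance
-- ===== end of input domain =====

-- B replaces A's per-element divmod over the flat index range with a nested row/column loop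
-- (one divmod at each end, partial first/last rows); alternative decomposition, same asymptotic cost.


-- ===== PORT A =====
def solution (n : Int) (left : Int) (right : Int) : List Int :=
  (PySem.List.pyRange left (right + 1) 1).foldl
    (fun ans i =>
      let a := PySem.Int.floordiv i n
      let b := PySem.Int.mod i n
      let p := if a < b then (b, a) else (a, b)
      ans ++ [p.1 + 1]) []

-- ===== PORT B =====
def solution_alt (n : Int) (left : Int) (right : Int) : List Int :=
  if left > right then []
  else
    let r0 := PySem.Int.floordiv left n
    let c0 := PySem.Int.mod left n
    let r1 := PySem.Int.floordiv right n
    let c1 := PySem.Int.mod right n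
    (PySem.List.pyRange r0 (r1 + 1) 1).foldl
      (fun ans r =>
        let lo := if r = r0 then c0 else 0
        let hi := if r = r1 then c1 else n - 1
        (PySem.List.pyRange lo (hi + 1) 1).foldl
          (fun ans2 c => ans2 ++ [if c ≤ r then r + 1 else c + 1]) ans) []

-- ===== PRECONDITION & SPEC =====
-- Pre_ excludes n = 0 with a nonempty index range, on which A raises ZeroDivisionError, and
-- negative n where the range left..right spans more than one divmod row: a negative side length is
-- outside the natural domain of the n×n-array problem, and there A's negative-floor divmod values
-- (a nonempty list) and B's empty list are both unspecified corners.
def Pre_solution (n : Int) (left : Int) (right : Int) : Prop :=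
  1 ≤ n ∨ right < left ∨ (n ≠ 0 ∧ PySem.Int.floordiv left n = PySem.Int.floordiv right n)
instance (n : Int) (left : Int) (right : Int) : Decidable (Pre_solution n left right) := by unfold Pre_solution; infer_instance
def pvWitness_solution : Int × Int × Int := (3, 2, 5)

def Spec_solution (n : Int) (left : Int) (right : Int) (out : List Int) : Prop := out = solution_alt n left right
instance (n : Int) (left : Int) (right : Int) (out : List Int) : Decidable (Spec_solution n left right out) := by unfold Spec_solution; infer_instance

-- ===== CLAIM (what is proved, stated in full; the proofs are below) =====
def Claim_equal_solution : Prop := ∀ (n : Int) (left : Int) (right : Int), Dom_solution n left right → Pre_solution n left right → Spec_solution n left right (solution n left right)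

-- ===== LEMMAS AND PROOFS =====

-- A's per-element value
def pvG (n i : Int) : Int :=
  (if PySem.Int.floordiv i n < PySem.Int.mod i n then PySem.Int.mod i n else PySem.Int.floordiv i n) + 1

lemma pvFdiv_le (n left right : Int) (hn0 : 0 < n) (h : left ≤ right) :
    PySem.Int.floordiv left n ≤ PySem.Int.floordiv right n := by
  rw [PySem.Int.le_floordiv_iff_mul_le hn0]
  have := PySem.Int.floordiv_mul_add_mod left n
  have := PySem.Int.mod_nonneg left hn0
  omega

-- B's row segment
def pvRow (r lo hi : Int) : List Int :=
  (PySem.List.pyRange lo (hi + 1) 1).map (fun c => if c ≤ r then r + 1 else c + 1)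

lemma solution_eq_map (n left right : Int) :
    solution n left right = (PySem.List.pyRange left (right + 1) 1).map (pvG n) := by
  simp [solution, pvG, apply_ite (Prod.fst), ← List.flatMap_def, ← List.map_eq_flatMap]

lemma solution_alt_eq_flatMap (n left right : Int) (h : left ≤ right) :
    solution_alt n left right =
      (PySem.List.pyRange (PySem.Int.floordiv left n) (PySem.Int.floordiv right n + 1) 1).flatMap
        (fun r => pvRow r (if r = PySem.Int.floordiv left n then PySem.Int.mod left n else 0)
                          (if r = PySem.Int.floordiv right n then PySem.Int.mod right n else n - 1)) := by
  simp [solution_alt, pvRow, not_lt.mpr h, ← List.flatMap_def, ← List.map_eq_flatMap]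

lemma pvG_row (n r c : Int) (hn : 1 ≤ n) (h0 : 0 ≤ c) (h1 : c < n) :
    pvG n (r * n + c) = if c ≤ r then r + 1 else c + 1 := by
  have hd : PySem.Int.floordiv (r * n + c) n = r := by
    rw [PySem.Int.floordiv_eq_iff_of_pos (by omega)]
    constructor <;> nlinarith
  have hm : PySem.Int.mod (r * n + c) n = c := by
    have := PySem.Int.floordiv_mul_add_mod (r * n + c) n
    rw [hd] at this; omega
  unfold pvG; rw [hd, hm]
  split_ifs <;> omega

lemma map_pvG_row (n r lo hi : Int) (hn : 1 ≤ n) (h0 : 0 ≤ lo) (h1 : hi < n) :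
    (PySem.List.pyRange (r * n + lo) (r * n + hi + 1) 1).map (pvG n) = pvRow r lo hi := by
  unfold pvRow
  rw [PySem.List.pyRange_one (r * n + lo), PySem.List.pyRange_one lo]
  have hlen : (r * n + hi + 1 - (r * n + lo)).toNat = (hi + 1 - lo).toNat := by omega
  rw [hlen, List.map_map, List.map_map]
  apply List.map_congr_left
  intro k hk
  rw [List.mem_range] at hk
  have hk' : (k : Int) < hi + 1 - lo := by omega
  have : r * n + lo + (k : Int) = r * n + (lo + k) := by ring
  simp only [Function.comp_apply, this]
  exact pvG_row n r (lo + k) hn (by omega) (by omega)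

lemma pvG_row_neg (n r c : Int) (hn : n ≤ -1) (h0 : n < c) (h1 : c ≤ 0) :
    pvG n (r * n + c) = if c ≤ r then r + 1 else c + 1 := by
  have hb := PySem.Int.mod_neg_bounds (r * n + c) (by omega : n < 0)
  have hfm := PySem.Int.floordiv_mul_add_mod (r * n + c) n
  have hd : PySem.Int.floordiv (r * n + c) n = r := by
    by_contra hne
    rcases lt_or_gt_of_ne hne with hlt | hgt
    · nlinarith [mul_le_mul_of_nonpos_right (by omega : PySem.Int.floordiv (r * n + c) n + 1 ≤ r) (by omega : n ≤ 0)]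
    · nlinarith [mul_le_mul_of_nonpos_right (by omega : r + 1 ≤ PySem.Int.floordiv (r * n + c) n) (by omega : n ≤ 0)]
  have hm : PySem.Int.mod (r * n + c) n = c := by rw [hd] at hfm; omega
  unfold pvG; rw [hd, hm]
  split_ifs <;> omega

lemma map_pvG_row_neg (n r lo hi : Int) (hn : n ≤ -1) (h0 : n < lo) (h1 : hi ≤ 0) :
    (PySem.List.pyRange (r * n + lo) (r * n + hi + 1) 1).map (pvG n) = pvRow r lo hi := by
  unfold pvRow
  rw [PySem.List.pyRange_one (r * n + lo), PySem.List.pyRange_one lo]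
  have hlen : (r * n + hi + 1 - (r * n + lo)).toNat = (hi + 1 - lo).toNat := by omega
  rw [hlen, List.map_map, List.map_map]
  apply List.map_congr_left
  intro k hk
  rw [List.mem_range] at hk
  have hk' : (k : Int) < hi + 1 - lo := by omega
  have : r * n + lo + (k : Int) = r * n + (lo + k) := by ring
  simp only [Function.comp_apply, this]
  exact pvG_row_neg n r (lo + k) hn (by omega) (by omega)

-- negative n, whole range inside one divmod row: A and B agree
lemma single_row_neg (n left right : Int) (hn : n ≤ -1) (hlr : left ≤ right)
    (heq : PySem.Int.floordiv left n = PySem.Int.floordiv right n) :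
    solution n left right = solution_alt n left right := by
  have hn0 : n < 0 := by omega
  have hml := PySem.Int.floordiv_mul_add_mod left n
  have hmr := PySem.Int.floordiv_mul_add_mod right n
  have hbl := PySem.Int.mod_neg_bounds left hn0
  have hbr := PySem.Int.mod_neg_bounds right hn0
  rw [solution_eq_map, solution_alt_eq_flatMap n left right hlr, ← heq,
      PySem.List.pyRange_one_singleton]
  rw [← heq] at hmr
  have hfirst : (PySem.List.pyRange left (right + 1) 1).map (pvG n)
      = pvRow (PySem.Int.floordiv left n) (PySem.Int.mod left n) (PySem.Int.mod right n) := by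
    have hL : left = PySem.Int.floordiv left n * n + PySem.Int.mod left n := by omega
    have hR : right + 1 = PySem.Int.floordiv left n * n + PySem.Int.mod right n + 1 := by omega
    conv_lhs => rw [hL, hR]
    exact map_pvG_row_neg n _ _ _ hn (by omega) (by omega)
  rw [hfirst]
  simp [heq]

lemma main_lemma (n : Int) (hn : 1 ≤ n) :
    ∀ (k : Nat) (left right : Int), left ≤ right →
      (PySem.Int.floordiv right n - PySem.Int.floordiv left n).toNat = k →
      (PySem.List.pyRange left (right + 1) 1).map (pvG n) =
        (PySem.List.pyRange (PySem.Int.floordiv left n) (PySem.Int.floordiv right n + 1) 1).flatMap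
          (fun r => pvRow r (if r = PySem.Int.floordiv left n then PySem.Int.mod left n else 0)
                            (if r = PySem.Int.floordiv right n then PySem.Int.mod right n else n - 1)) := by
  intro k
  induction k with
  | zero =>
    intro left right hlr hk
    have hn0 : (0:Int) < n := by omega
    have hle := pvFdiv_le n left right hn0 hlr
    have hr : PySem.Int.floordiv right n = PySem.Int.floordiv left n := by omega
    have hml := PySem.Int.floordiv_mul_add_mod left n
    have hmr := PySem.Int.floordiv_mul_add_mod right n
    have hm0 := PySem.Int.mod_nonneg left hn0
    have hm1 := PySem.Int.mod_lt right hn0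
    rw [hr] at hmr
    rw [hr, PySem.List.pyRange_one_singleton]
    have hL : left = PySem.Int.floordiv left n * n + PySem.Int.mod left n := by omega
    have hR : right + 1 = PySem.Int.floordiv left n * n + PySem.Int.mod right n + 1 := by omega
    have hfirst : (PySem.List.pyRange left (right + 1) 1).map (pvG n)
        = pvRow (PySem.Int.floordiv left n) (PySem.Int.mod left n) (PySem.Int.mod right n) := by
      conv_lhs => rw [hL, hR]
      exact map_pvG_row n _ _ _ hn (by omega) (by omega)
    rw [hfirst]
    simp
  | succ k ih =>
    intro left right hlr hk
    have hn0 : (0:Int) < n := by omega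
    have hle := pvFdiv_le n left right hn0 hlr
    have hlt : PySem.Int.floordiv left n < PySem.Int.floordiv right n := by omega
    have hml := PySem.Int.floordiv_mul_add_mod left n
    have hmr := PySem.Int.floordiv_mul_add_mod right n
    have hm0 := PySem.Int.mod_nonneg left hn0
    have hm1 := PySem.Int.mod_lt left hn0
    have hm0r := PySem.Int.mod_nonneg right hn0
    set r0 := PySem.Int.floordiv left n with hr0
    set r1 := PySem.Int.floordiv right n with hr1
    have hmn : (r0 + 1) * n ≤ r1 * n := by
      have := mul_le_mul_of_nonneg_right (by omega : r0 + 1 ≤ r1) (by omega : (0:Int) ≤ n)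
      linarith
    have h1 : left ≤ (r0 + 1) * n := by nlinarith
    have h2 : (r0 + 1) * n ≤ right + 1 := by nlinarith
    -- floordiv and mod of the split point
    have hdm : PySem.Int.floordiv ((r0 + 1) * n) n = r0 + 1 := by
      rw [PySem.Int.floordiv_eq_iff_of_pos hn0]; constructor <;> nlinarith
    have hmm : PySem.Int.mod ((r0 + 1) * n) n = 0 := by
      have := PySem.Int.floordiv_mul_add_mod ((r0 + 1) * n) n
      rw [hdm] at this; omega
    rw [PySem.List.pyRange_one_append left ((r0 + 1) * n) (right + 1) h1 h2, List.map_append]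
    have hfirst : (PySem.List.pyRange left ((r0 + 1) * n) 1).map (pvG n)
        = pvRow r0 (PySem.Int.mod left n) (n - 1) := by
      have hL : left = r0 * n + PySem.Int.mod left n := by omega
      have hM : (r0 + 1) * n = r0 * n + (n - 1) + 1 := by ring
      conv_lhs => rw [hL, hM]
      exact map_pvG_row n _ _ _ hn (by omega) (by omega)
    have hsecond := ih ((r0 + 1) * n) right (by nlinarith) (by rw [hdm, ← hr1]; omega)
    rw [hdm, hmm] at hsecond
    rw [hfirst, hsecond]
    rw [PySem.List.pyRange_one_cons (by omega : r0 < r1 + 1)]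
    rw [List.flatMap_cons]
    have hne : r0 ≠ r1 := by omega
    simp only [if_neg hne]
    congr 1
    apply List.flatMap_congr
    intro r hr
    rw [PySem.List.mem_pyRange_one] at hr
    have : r ≠ r0 := by omega
    simp only [if_neg this, ite_self]
    rw [hr1]

-- ===== VERDICT (by name: the statement is the Claim_ definition above) =====
theorem solution_spec : Claim_equal_solution := by
  intro n left right _ hpre
  unfold Spec_solution
  by_cases h : left ≤ right
  · by_cases hn : 1 ≤ n
    · rw [solution_eq_map, solution_alt_eq_flatMap n left right h]
      exact main_lemma n hn _ left right h rfl
    · obtain ⟨hn0, heq⟩ : n ≠ 0 ∧ PySem.Int.floordiv left n = PySem.Int.floordiv right n := by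
        rcases hpre with h1 | h1 | h1 <;> first | omega | exact h1
      exact single_row_neg n left right (by omega) h heq
  · rw [solution_eq_map]
    have : right + 1 ≤ left := by omega
    rw [PySem.List.pyRange_one_eq_nil this]
    have hgt : left > right := by omega
    simp [solution_alt, hgt]
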